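-- pv_equiv track=rewrite | github.com/wjddnjs1010/codetree-TILs | 240903/일렬로 서있는 소 2/cattle-in-a-rowing-up-2.py | count_valid_triplets
-- ===== SOURCE A (Python) =====
-- def count_valid_triplets(n,heights):
--     count = 0
--
--     for i in range(n):
--         for j in range(i+1,n):
--             for k in range(j+1,n):
--                 if heights[i]<=heights[j] and heights[j]<=heights[k]:
--                     count+=1
--     return count
-- ===== SOURCE B (Python) =====
-- def count_valid_triplets(n, heights):
--     hs = heights[:n] if n > 0 else []
--     total = 0
--     for j, h in enumerate(hs):
--         left = sum(1 for x in hs[:j] if x <= h)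
--         right = sum(1 for x in hs[j+1:] if h <= x)
--         total += left * right
--     return total
-- ===== Notes on version B (the rewrite author's own statement) =====
-- stated objective: faster
-- what changed: Replaces the O(n^3) brute-force scan of all triples by a per-middle count: for each middle index j, multiply the count of earlier elements <= heights[j] by the count of later elements >= heights[j] and sum the products.
import Mathlib
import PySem

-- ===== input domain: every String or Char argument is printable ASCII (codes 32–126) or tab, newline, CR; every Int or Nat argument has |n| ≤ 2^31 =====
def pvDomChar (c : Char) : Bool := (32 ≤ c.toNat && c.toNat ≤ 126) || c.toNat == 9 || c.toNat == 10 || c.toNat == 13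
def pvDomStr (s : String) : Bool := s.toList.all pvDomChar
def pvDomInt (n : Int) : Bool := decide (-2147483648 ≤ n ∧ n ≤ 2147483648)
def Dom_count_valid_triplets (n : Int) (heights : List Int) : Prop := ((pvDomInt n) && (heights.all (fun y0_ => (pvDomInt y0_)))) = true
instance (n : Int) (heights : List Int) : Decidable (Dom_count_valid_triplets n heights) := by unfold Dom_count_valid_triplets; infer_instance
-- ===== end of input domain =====

-- B replaces A's brute-force triple loop by a per-middle count: for each middle index j it
-- multiplies the number of earlier elements ≤ heights[j] by the number of later elements
-- ≥ heights[j]; one quadratic pass instead of a cubic triple scan.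

-- ===== PORT A =====
def count_valid_triplets (n : Int) (heights : List Int) : Int :=
  (PySem.List.pyRange 0 n 1).foldl (fun count i =>
    (PySem.List.pyRange (i+1) n 1).foldl (fun count j =>
      (PySem.List.pyRange (j+1) n 1).foldl (fun count k =>
        if PySem.List.pyGetD heights i 0 ≤ PySem.List.pyGetD heights j 0 ∧
           PySem.List.pyGetD heights j 0 ≤ PySem.List.pyGetD heights k 0
        then count + 1 else count) count) count) 0

-- ===== PORT B =====
def count_valid_triplets_alt (n : Int) (heights : List Int) : Int :=
  let hs := if 0 < n then PySem.List.slice heights none (some n) else []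
  (PySem.List.enumerate hs 0).foldl (fun total jh =>
    let left : Int := (PySem.List.slice hs none (some jh.1)).countP (fun x => x ≤ jh.2)
    let right : Int := (PySem.List.slice hs (some (jh.1 + 1)) none).countP (fun x => jh.2 ≤ x)
    total + left * right) 0

-- ===== PRECONDITION & SPEC =====
-- Pre_ excludes exactly the inputs on which A raises IndexError: n > len(heights) with
-- n ≥ 3 (for n ≤ 2 the innermost loop body is never reached, so A never indexes).
def Pre_count_valid_triplets (n : Int) (heights : List Int) : Prop :=
  n ≤ (heights.length : Int) ∨ n ≤ 2
instance (n : Int) (heights : List Int) : Decidable (Pre_count_valid_triplets n heights) := by unfold Pre_count_valid_triplets; infer_instance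
def pvWitness_count_valid_triplets : Int × List Int := (4, [1, 3, 2, 3])

def Spec_count_valid_triplets (n : Int) (heights : List Int) (out : Int) : Prop := out = count_valid_triplets_alt n heights
instance (n : Int) (heights : List Int) (out : Int) : Decidable (Spec_count_valid_triplets n heights out) := by unfold Spec_count_valid_triplets; infer_instance

-- ===== CLAIM (what is proved, stated in full; the proofs are below) =====
def Claim_equal_count_valid_triplets : Prop := ∀ (n : Int) (heights : List Int), Dom_count_valid_triplets n heights → Pre_count_valid_triplets n heights → Spec_count_valid_triplets n heights (count_valid_triplets n heights)

-- ===== LEMMAS AND PROOFS =====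

-- canonical per-middle form both ports are reduced to
def triF (m : Nat) (g : Nat → Int) : Int :=
  ∑ j ∈ Finset.range m,
    (∑ i ∈ Finset.range m, if i < j ∧ g i ≤ g j then (1 : Int) else 0) *
    (∑ k ∈ Finset.range m, if j < k ∧ g j ≤ g k then (1 : Int) else 0)

theorem sum_map_pyRange (a b : Int) (ha : 0 ≤ a) (f : Int → Int) :
    ((PySem.List.pyRange a b 1).map f).sum = ∑ t ∈ Finset.Ico a.toNat b.toNat, f (t : Int) := by
  rw [PySem.List.pyRange_one, List.map_map, Finset.sum_Ico_eq_sum_range]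
  have h1 : ((List.range (b - a).toNat).map (f ∘ fun k => a + ↑k)).sum
      = ∑ k ∈ Finset.range (b - a).toNat, f (a + k) := Int.neg_inj.mp rfl
  rw [h1, show b.toNat - a.toNat = (b - a).toNat by omega]
  exact Finset.sum_congr rfl fun k _ => by congr 1; omega

theorem countP_pyRange_eq_sum (a b : Int) (ha : 0 ≤ a) (p : Int → Bool) :
    (((PySem.List.pyRange a b 1).countP p : Int)) = ∑ t ∈ Finset.Ico a.toNat b.toNat, if p t then (1:Int) else 0 := by
  rw [← PySem.List.sum_map_ite_one_zero, sum_map_pyRange a b ha]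

theorem Ico_eq_filter (a m : Nat) : Finset.Ico a m = (Finset.range m).filter (fun j => a ≤ j) := by
  ext x; simp; omega

theorem range_eq_filter (j m : Nat) (h : j ≤ m) : Finset.range j = (Finset.range m).filter (fun i => i < j) := by
  ext x; simp; omega

theorem countP_eq_sum (l : List Int) (p : Int → Bool) :
    ((l.countP p : Int)) = ∑ i ∈ Finset.range l.length, if p (l.getD i 0) then (1:Int) else 0 := by
  induction l with
  | nil => simp
  | cons x t ih =>
    rw [List.countP_cons, List.length_cons, Finset.sum_range_succ']
    simp only [List.getD_cons_succ, List.getD_cons_zero]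
    rw [← ih]
    by_cases hp : p x <;> simp [hp]

theorem countP_take (l : List Int) (j : Nat) (hj : j ≤ l.length) (p : Int → Bool) :
    (((l.take j).countP p : Int)) = ∑ i ∈ Finset.range l.length, if i < j ∧ p (l.getD i 0) then (1:Int) else 0 := by
  rw [countP_eq_sum, List.length_take, Nat.min_eq_left hj,
      range_eq_filter j l.length hj, Finset.sum_filter]
  apply Finset.sum_congr rfl
  intro i _
  by_cases hij : i < j
  · have hgd : (l.take j).getD i 0 = l.getD i 0 := by
      simp [List.getD_eq_getElem?_getD, hij]
    simp [hij]
  · simp [hij]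

theorem countP_drop (l : List Int) (j : Nat) (p : Int → Bool) :
    (((l.drop j).countP p : Int)) = ∑ k ∈ Finset.range l.length, if j ≤ k ∧ p (l.getD k 0) then (1:Int) else 0 := by
  rw [countP_eq_sum, List.length_drop]
  have hD : ∀ t, (l.drop j).getD t 0 = l.getD (j+t) 0 := by
    intro t; simp [List.getD_eq_getElem?_getD, List.getElem?_drop]
  simp only [hD]
  rw [← Finset.sum_Ico_eq_sum_range (f := fun k => if p (l.getD k 0) then (1:Int) else 0) (m := j) (n := l.length)]
  rw [Ico_eq_filter, Finset.sum_filter]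
  apply Finset.sum_congr rfl
  intro k _
  split_ifs <;> tauto

theorem tri_swap (m : Nat) (g : Nat → Int) :
    (∑ i ∈ Finset.range m, ∑ j ∈ Finset.Ico (i+1) m, ∑ k ∈ Finset.Ico (j+1) m,
        (if g i ≤ g j ∧ g j ≤ g k then (1:Int) else 0)) = triF m g := by
  have step1 : ∀ i j, (∑ k ∈ Finset.Ico (j+1) m, (if g i ≤ g j ∧ g j ≤ g k then (1:Int) else 0))
      = (if g i ≤ g j then (1:Int) else 0) * ∑ k ∈ Finset.range m, (if j < k ∧ g j ≤ g k then (1:Int) else 0) := by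
    intro i j
    rw [Ico_eq_filter, Finset.sum_filter]
    by_cases h : g i ≤ g j
    · simp only [h, true_and, if_true, one_mul]
      apply Finset.sum_congr rfl; intro k _
      split_ifs <;> simp_all
    · simp [h]
  simp only [step1]
  rw [Finset.sum_congr rfl (fun i _ => by rw [Ico_eq_filter, Finset.sum_filter]), Finset.sum_comm]
  apply Finset.sum_congr rfl
  intro j _
  rw [Finset.sum_mul]
  apply Finset.sum_congr rfl
  intro i _
  split_ifs <;> simp_all

theorem portA_eq_triF (n : Int) (heights : List Int) :
    count_valid_triplets n heights = triF n.toNat (fun t => heights.getD t 0) := by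
  unfold count_valid_triplets
  simp only [PySem.List.foldl_ite_add_one, PySem.List.foldl_add, zero_add]
  rw [sum_map_pyRange 0 n le_rfl, ← tri_swap,
      show (0:Int).toNat = 0 from rfl, Finset.range_eq_Ico]
  apply Finset.sum_congr rfl
  intro i _
  rw [sum_map_pyRange (↑i+1) n (by positivity), show ((i:Int)+1).toNat = i + 1 by omega]
  apply Finset.sum_congr rfl
  intro j _
  rw [countP_pyRange_eq_sum (↑j+1) n (by positivity), show ((j:Int)+1).toNat = j + 1 by omega]
  apply Finset.sum_congr rfl
  intro k _
  simp [PySem.List.pyGetD_natCast]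

theorem triF_congr (m : Nat) (g1 g2 : Nat → Int) (h : ∀ t, t < m → g1 t = g2 t) :
    triF m g1 = triF m g2 := by
  unfold triF
  apply Finset.sum_congr rfl
  intro j hj
  rw [Finset.mem_range] at hj
  congr 1
  · exact Finset.sum_congr rfl fun i hi => by
      rw [Finset.mem_range] at hi; rw [h i hi, h j hj]
  · exact Finset.sum_congr rfl fun k hk => by
      rw [Finset.mem_range] at hk; rw [h j hj, h k hk]

theorem portB_eq_triF (n : Int) (heights : List Int) (hn : 0 < n) :
    count_valid_triplets_alt n heights
      = triF (min n.toNat heights.length) (fun t => heights.getD t 0) := by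
  unfold count_valid_triplets_alt
  simp only [if_pos hn, PySem.List.slice_to heights (le_of_lt hn)]
  set hs : List Int := heights.take n.toNat with hhs
  have hlen : hs.length = min n.toNat heights.length := by
    rw [hhs, List.length_take]
  rw [PySem.List.foldl_add, zero_add, PySem.List.enumerate_eq_map_pyRange hs 0,
      List.map_map, sum_map_pyRange 0 (PySem.List.len hs) le_rfl]
  have hlen' : (PySem.List.len hs).toNat = min n.toNat heights.length := by
    rw [PySem.List.len_eq, hlen]; omega
  rw [hlen', show (0:Int).toNat = 0 from rfl,
      show Finset.Ico 0 (min n.toNat heights.length) = Finset.range (min n.toNat heights.length) by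
        rw [Finset.range_eq_Ico]]
  have hmain : ∀ j : Nat, j < min n.toNat heights.length →
      ((PySem.List.slice hs none (some (j:Int))).countP (fun x => x ≤ PySem.List.pyGetD hs (j:Int) 0) : Int) *
      ((PySem.List.slice hs (some ((j:Int) + 1)) none).countP (fun x => PySem.List.pyGetD hs (j:Int) 0 ≤ x) : Int)
      = (∑ i ∈ Finset.range (min n.toNat heights.length), if i < j ∧ hs.getD i 0 ≤ hs.getD j 0 then (1:Int) else 0) *
        (∑ k ∈ Finset.range (min n.toNat heights.length), if j < k ∧ hs.getD j 0 ≤ hs.getD k 0 then (1:Int) else 0) := by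
    intro j hjm
    simp only [PySem.List.pyGetD_natCast,
      PySem.List.slice_to hs (by positivity : (0:Int) ≤ (j:Int)),
      PySem.List.slice_from hs (by positivity : (0:Int) ≤ (j:Int) + 1),
      show ((j:Int)).toNat = j by omega, show ((j:Int)+1).toNat = j + 1 by omega]
    rw [countP_take hs j (by omega) _, countP_drop hs (j+1) _, hlen]
    congr 1
    · exact Finset.sum_congr rfl fun i _ => by split_ifs <;> simp_all <;> omega
    · exact Finset.sum_congr rfl fun k _ => by split_ifs <;> simp_all <;> omega
  have hgd : ∀ t, t < min n.toNat heights.length → hs.getD t 0 = heights.getD t 0 := by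
    intro t ht
    rw [hhs]
    simp [List.getD_eq_getElem?_getD, show t < n.toNat by omega]
  refine .trans ?_
    (triF_congr (min n.toNat heights.length) (fun t => hs.getD t 0) (fun t => heights.getD t 0) hgd)
  unfold triF
  refine Finset.sum_congr rfl fun j hj => ?_
  simpa using hmain j (Finset.mem_range.mp hj)

theorem triF_small (m : Nat) (g : Nat → Int) (hm : m ≤ 2) : triF m g = 0 := by
  interval_cases m <;> simp [triF, Finset.sum_range_succ]

-- ===== VERDICT (by name: the statement is the Claim_ definition above) =====
theorem count_valid_triplets_spec : Claim_equal_count_valid_triplets := by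
  intro n heights _ hpre
  unfold Spec_count_valid_triplets
  by_cases hn : 0 < n
  · rw [portA_eq_triF n heights, portB_eq_triF n heights hn]
    rcases hpre with hle | h2
    · rw [Nat.min_eq_left (by omega)]
    · rw [triF_small _ _ (by omega), triF_small _ _ (by omega)]
  · simp only [count_valid_triplets, count_valid_triplets_alt,
      PySem.List.pyRange_one_eq_nil (by omega : n ≤ 0), if_neg hn,
      PySem.List.enumerate_nil, List.foldl_nil]
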